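-- pv_equiv track=rewrite | github.com/jeff-regier/stats315winter2026 | make_student_version.py | split_solution_and_tests
-- ===== SOURCE A (Python) =====
-- def is_test_header_comment(line: str) -> bool:
--     """Check if a line is a test section header comment."""
--     stripped = line.strip().lower()
--     return stripped.startswith("# test") and not stripped.startswith("# testing")
--
-- def split_solution_and_tests(source_lines: list[str]) -> tuple[list[str], list[str]]:
--     """Split a cell's source into solution code and test code.
--
--     Returns (solution_lines, test_lines).
--     """
--     solution_lines: list[str] = []
--     test_lines: list[str] = []
--
--     in_solution = False
--     found_test_start = False
--
--     for line in source_lines: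
--         stripped = line.rstrip("\n").strip()
--
--         # Track solution blocks
--         if stripped == "# BEGIN SOLUTION":
--             in_solution = True
--         elif stripped == "# END SOLUTION":
--             in_solution = False
--
--         # Track hidden test blocks
--         if stripped in {"# BEGIN HIDDEN TESTS", "# END HIDDEN TESTS"}:
--             pass
--
--         # Check if this line starts the test section
--         is_assert_line = "assert " in line and not in_solution
--         is_hidden_marker = stripped == "# BEGIN HIDDEN TESTS"
--         is_test_comment = is_test_header_comment(line) and not in_solution
--
--         if (
--             is_assert_line or is_hidden_marker or is_test_comment
--         ) and not found_test_start:
--             found_test_start = True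
--
--         # Route line to appropriate section
--         if found_test_start:
--             test_lines.append(line)
--         else:
--             solution_lines.append(line)
--
--     # Clean up trailing empty lines from solution
--     while solution_lines and solution_lines[-1].strip() == "":
--         solution_lines.pop()
--
--     # Add newline at end of solution if needed
--     if solution_lines and not solution_lines[-1].endswith("\n"):
--         solution_lines[-1] += "\n"
--
--     return solution_lines, test_lines
-- ===== SOURCE B (Python) =====
-- def is_test_header_comment(line: str) -> bool:
--     """Check if a line is a test section header comment."""
--     stripped = line.strip().lower()
--     return stripped.startswith("# test") and not stripped.startswith("# testing")
--
--
-- def _find_split(source_lines):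
--     """Index of the first line that starts the test section, or None."""
--     in_solution = False
--     for i, line in enumerate(source_lines):
--         stripped = line.strip()
--         if stripped == "# BEGIN SOLUTION":
--             in_solution = True
--         elif stripped == "# END SOLUTION":
--             in_solution = False
--         if (
--             ("assert " in line and not in_solution)
--             or stripped == "# BEGIN HIDDEN TESTS"
--             or (is_test_header_comment(line) and not in_solution)
--         ):
--             return i
--     return None
--
--
-- def _trim_trailing_blank(lines):
--     """Drop trailing blank lines (recursively)."""
--     if lines and lines[-1].strip() == "":
--         return _trim_trailing_blank(lines[:-1])
--     return lines
--
--
-- def split_solution_and_tests(source_lines: list[str]) -> tuple[list[str], list[str]]: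
--     """Split a cell's source into solution code and test code.
--
--     Returns (solution_lines, test_lines).
--     """
--     split = _find_split(source_lines)
--     if split is None:
--         split = len(source_lines)
--     solution_lines = _trim_trailing_blank(source_lines[:split])
--     if solution_lines and not solution_lines[-1].endswith("\n"):
--         solution_lines[-1] += "\n"
--     return solution_lines, source_lines[split:]
-- ===== Notes on version B (the rewrite author's own statement) =====
-- stated objective: alternative
-- what changed: B first computes the index of the line that starts the test section (early-return scan with the in_solution toggle) and then slices the list in two, instead of A's single pass that routes every line into one of two growing accumulator lists via a found_test_start flag; the trailing-blank cleanup is a recursive trim instead of a pop loop.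
import Mathlib
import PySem

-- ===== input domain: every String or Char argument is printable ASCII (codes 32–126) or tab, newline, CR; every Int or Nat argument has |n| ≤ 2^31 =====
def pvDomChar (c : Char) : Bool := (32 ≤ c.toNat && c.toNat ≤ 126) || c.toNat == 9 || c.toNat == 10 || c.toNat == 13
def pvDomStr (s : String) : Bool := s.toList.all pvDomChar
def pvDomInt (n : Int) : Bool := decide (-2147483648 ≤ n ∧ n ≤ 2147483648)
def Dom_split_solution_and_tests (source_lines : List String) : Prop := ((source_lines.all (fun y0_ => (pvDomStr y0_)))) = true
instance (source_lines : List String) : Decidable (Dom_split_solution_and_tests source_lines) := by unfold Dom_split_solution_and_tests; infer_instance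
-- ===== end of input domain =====

-- B computes the test-section start index first and slices (alternative decomposition, same O(n) cost, not faster); return values only — neither program mutates its argument.
-- ===== PORT A =====
-- B differs from A only in decomposition (find the split index, then slice); A's single routing pass is ported below.
-- hand port of line.rstrip("\n"): drops exactly the trailing '\n' characters (exact for this one-char strip set)
def pvRstripNl (s : String) : String :=
  String.ofList ((s.toList.reverse.dropWhile (· == '\n')).reverse)

def pvIsTestHeaderComment (line : String) : Bool :=
  let stripped := PySem.Str.lower (PySem.Str.strip line)
  PySem.Str.startswith stripped "# test" && !(PySem.Str.startswith stripped "# testing")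

def pvGoA : List String → Bool → Bool → List String → List String → List String × List String
  | [], _, _, sol, tests => (sol, tests)
  | line :: rest, inSol, found, sol, tests =>
    let stripped := PySem.Str.strip (pvRstripNl line)
    let inSol' := if stripped == "# BEGIN SOLUTION" then true
                  else if stripped == "# END SOLUTION" then false
                  else inSol
    let isAssert := PySem.Str.isIn "assert " line && !inSol'
    let isHidden := stripped == "# BEGIN HIDDEN TESTS"
    let isTest := pvIsTestHeaderComment line && !inSol'
    let found' := found || (isAssert || isHidden || isTest)
    if found' then pvGoA rest inSol' found' sol (tests ++ [line])
    else pvGoA rest inSol' found' (sol ++ [line]) tests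

-- while solution_lines and solution_lines[-1].strip() == "": solution_lines.pop()
def pvPopTrailingA (sol : List String) : List String :=
  if h : sol ≠ [] ∧ PySem.Str.strip ((sol.getLast? ).getD "") == "" then
    pvPopTrailingA sol.dropLast
  else sol
termination_by sol.length
decreasing_by
  have : sol ≠ [] := h.1
  cases sol with
  | nil => exact absurd rfl this
  | cons a t => simp

-- if solution_lines and not solution_lines[-1].endswith("\n"): solution_lines[-1] += "\n"
def pvFixNewlineA (sol : List String) : List String :=
  match sol.getLast? with
  | none => sol
  | some last => if PySem.Str.endswith last "\n" then sol else sol.dropLast ++ [last ++ "\n"]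

def split_solution_and_tests (source_lines : List String) : List String × List String :=
  let r := pvGoA source_lines false false [] []
  (pvFixNewlineA (pvPopTrailingA r.1), r.2)

-- ===== PORT B =====
-- _find_split: index of the first test-section line, none if absent
def pvFindSplit : List String → Bool → Nat → Option Nat
  | [], _, _ => none
  | line :: rest, inSol, i =>
    let stripped := PySem.Str.strip line
    let inSol' := if stripped == "# BEGIN SOLUTION" then true
                  else if stripped == "# END SOLUTION" then false
                  else inSol
    if (PySem.Str.isIn "assert " line && !inSol') || stripped == "# BEGIN HIDDEN TESTS"
        || (pvIsTestHeaderComment line && !inSol') then some i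
    else pvFindSplit rest inSol' (i + 1)

-- _trim_trailing_blank: lines[:-1] recursion ([: -1] = dropLast, PySem.List.slice_to_neg_one)
def pvTrimTrailingBlank (lines : List String) : List String :=
  match h : lines.getLast? with
  | none => lines
  | some last =>
    if PySem.Str.strip last == "" then
      pvTrimTrailingBlank (PySem.List.slice lines none (some (-1)))
    else lines
termination_by lines.length
decreasing_by
  rw [PySem.List.slice_to_neg_one]
  cases lines with
  | nil => simp at h
  | cons a t => simp

def split_solution_and_tests_alt (source_lines : List String) : List String × List String :=
  let split := (pvFindSplit source_lines false 0).getD source_lines.length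
  let solution := pvTrimTrailingBlank (source_lines.take split)    -- source_lines[:split]
  let solution :=
    match solution.getLast? with
    | none => solution
    | some last => if PySem.Str.endswith last "\n" then solution
                   else solution.dropLast ++ [last ++ "\n"]
  (solution, source_lines.drop split)                              -- source_lines[split:]

-- ===== PRECONDITION & SPEC =====
def Spec_split_solution_and_tests (source_lines : List String) (out : List String × List String) : Prop := out = split_solution_and_tests_alt source_lines
instance (source_lines : List String) (out : List String × List String) : Decidable (Spec_split_solution_and_tests source_lines out) := by unfold Spec_split_solution_and_tests; infer_instance

-- ===== CLAIM (what is proved, stated in full; the proofs are below) =====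
def Claim_equal_split_solution_and_tests : Prop := ∀ (source_lines : List String), Dom_split_solution_and_tests source_lines → Spec_split_solution_and_tests source_lines (split_solution_and_tests source_lines)

-- ===== LEMMAS AND PROOFS =====
-- line.rstrip("\n") as a back-drop on the char list
def pvBdrop (q : Char → Bool) (l : List Char) : List Char := (List.dropWhile q l.reverse).reverse

theorem pvBdrop_cons (q : Char → Bool) (a : Char) (t : List Char) :
    pvBdrop q (a :: t) = if pvBdrop q t = [] then (if q a then [] else [a]) else a :: pvBdrop q t := by
  unfold pvBdrop
  rw [List.reverse_cons, List.dropWhile_append]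
  by_cases h : List.dropWhile q t.reverse = []
  · simp [h, List.dropWhile]
    by_cases hq : q a <;> simp [hq]
  · simp [h, List.isEmpty_iff]

theorem pvDropWhile_imp (p q : Char → Bool) (h : ∀ c, q c = true → p c = true) (l : List Char) :
    List.dropWhile p (List.dropWhile q l) = List.dropWhile p l := by
  induction l with
  | nil => rfl
  | cons a t ih =>
    by_cases hq : q a = true
    · simp [List.dropWhile, hq, h a hq, ih]
    · simp [List.dropWhile, hq]

theorem pvNl_imp_sp : ∀ c : Char, (c == '\n') = true → PySem.Chars.isspace c = true := by
  intro c hc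
  have : c = '\n' := eq_of_beq hc
  subst this; decide

theorem pvComm (l : List Char) :
    List.dropWhile PySem.Chars.isspace (pvBdrop (· == '\n') l)
      = pvBdrop (· == '\n') (List.dropWhile PySem.Chars.isspace l) := by
  induction l with
  | nil => rfl
  | cons a t ih =>
    rw [pvBdrop_cons]
    by_cases h0 : pvBdrop (· == '\n') t = []
    · rw [if_pos h0]
      have hmem : ∀ x ∈ t, (x == '\n') = true := by
        intro x hx
        have hnil : List.dropWhile (· == '\n') t.reverse = [] := by
          simpa [pvBdrop, List.reverse_eq_nil_iff] using h0
        exact List.dropWhile_eq_nil_iff.mp hnil x (List.mem_reverse.mpr hx)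
      have hspt : List.dropWhile PySem.Chars.isspace t = [] :=
        List.dropWhile_eq_nil_iff.mpr (fun x hx => pvNl_imp_sp x (hmem x hx))
      by_cases hsp : PySem.Chars.isspace a = true
      · rw [List.dropWhile_cons_of_pos hsp, hspt]
        by_cases hnl : (a == '\n') = true <;>
          simp [hnl, List.dropWhile, hsp, pvBdrop]
      · have hnl : (a == '\n') = false := by
          cases hh : (a == '\n') with
          | true => exact absurd (pvNl_imp_sp a hh) hsp
          | false => rfl
        rw [if_neg (by simp [hnl]), List.dropWhile_cons_of_neg (by simp [hsp]),
            List.dropWhile_cons_of_neg (by simp [hsp]), pvBdrop_cons, if_pos h0,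
            if_neg (by simp [hnl])]
    · rw [if_neg h0]
      by_cases hsp : PySem.Chars.isspace a = true
      · rw [List.dropWhile_cons_of_pos hsp, List.dropWhile_cons_of_pos hsp, ih]
      · have hnl : (a == '\n') = false := by
          cases hh : (a == '\n') with
          | true => exact absurd (pvNl_imp_sp a hh) hsp
          | false => rfl
        rw [List.dropWhile_cons_of_neg (by simp [hsp]),
            List.dropWhile_cons_of_neg (by simp [hsp]), pvBdrop_cons, if_neg h0]

theorem pvStrip_bdrop (l : List Char) :
    PySem.Chars.strip (pvBdrop (· == '\n') l) = PySem.Chars.strip l := by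
  simp only [PySem.Chars.strip, PySem.Chars.lstrip, PySem.Chars.rstrip]
  rw [pvComm]
  simp only [pvBdrop, List.reverse_reverse]
  rw [pvDropWhile_imp _ _ pvNl_imp_sp]

theorem pvStrip_rstripNl (s : String) :
    PySem.Str.strip (pvRstripNl s) = PySem.Str.strip s := by
  unfold pvRstripNl
  simp only [PySem.Str.strip, String.toList_ofList]
  exact congrArg String.ofList (pvStrip_bdrop s.toList)

theorem pvFindSplit_shift (lines : List String) :
    ∀ (s : Bool) (i : Nat), pvFindSplit lines s i = (pvFindSplit lines s 0).map (· + i) := by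
  induction lines with
  | nil => intro s i; rfl
  | cons line rest ih =>
    intro s i
    simp only [pvFindSplit]
    generalize (if (PySem.Str.strip line == "# BEGIN SOLUTION") = true then true
        else if (PySem.Str.strip line == "# END SOLUTION") = true then false else s) = s'
    by_cases hc : (PySem.Str.isIn "assert " line && !s'
        || PySem.Str.strip line == "# BEGIN HIDDEN TESTS"
        || pvIsTestHeaderComment line && !s') = true
    · rw [if_pos hc, if_pos hc]; simp
    · rw [if_neg hc, if_neg hc, ih _ (i + 1), ih _ 1, Option.map_map]
      congr 1
      funext k
      simp [Function.comp]
      omega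

theorem pvGoA_found (lines : List String) :
    ∀ (s : Bool) (sol tests : List String),
      pvGoA lines s true sol tests = (sol, tests ++ lines) := by
  induction lines with
  | nil => intro s sol tests; simp [pvGoA]
  | cons line rest ih =>
    intro s sol tests
    simp only [pvGoA, Bool.true_or, if_true]
    rw [ih]
    simp

theorem pvGoA_split (lines : List String) :
    ∀ (s : Bool) (sol tests : List String),
      pvGoA lines s false sol tests =
        (sol ++ lines.take ((pvFindSplit lines s 0).getD lines.length),
         tests ++ lines.drop ((pvFindSplit lines s 0).getD lines.length)) := by
  induction lines with
  | nil => intro s sol tests; simp [pvGoA, pvFindSplit]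
  | cons line rest ih =>
    intro s sol tests
    simp only [pvGoA, pvFindSplit, pvStrip_rstripNl, Bool.false_or]
    generalize (if (PySem.Str.strip line == "# BEGIN SOLUTION") = true then true
        else if (PySem.Str.strip line == "# END SOLUTION") = true then false else s) = s'
    by_cases hc : (PySem.Str.isIn "assert " line && !s'
        || PySem.Str.strip line == "# BEGIN HIDDEN TESTS"
        || pvIsTestHeaderComment line && !s') = true
    · rw [if_pos hc, if_pos hc, hc, pvGoA_found]
      simp
    · have hcf := Bool.of_not_eq_true hc
      rw [if_neg hc, if_neg hc, hcf, ih, pvFindSplit_shift rest s' 1]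
      cases hP : pvFindSplit rest s' 0 with
      | none => simp
      | some k => simp [List.take_succ_cons, List.drop_succ_cons]

theorem pvTrim_stop (l : List String)
    (h : ¬(l ≠ [] ∧ (PySem.Str.strip (l.getLast?.getD "") == "") = true)) :
    pvTrimTrailingBlank l = l := by
  rw [pvTrimTrailingBlank]
  split
  · rfl
  · next last heq =>
    rw [if_neg]
    intro hb
    exact h ⟨by intro he; subst he; simp at heq, by simpa [heq] using hb⟩

theorem pvTrim_step (l : List String)
    (h : l ≠ [] ∧ (PySem.Str.strip (l.getLast?.getD "") == "") = true) :
    pvTrimTrailingBlank l = pvTrimTrailingBlank l.dropLast := by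
  rw [pvTrimTrailingBlank]
  split
  · next heq => exact absurd (List.getLast?_eq_none_iff.mp heq) h.1
  · next last heq =>
    rw [if_pos (by simpa [heq] using h.2), PySem.List.slice_to_neg_one]

theorem pvPop_eq_trim (l : List String) : pvPopTrailingA l = pvTrimTrailingBlank l := by
  induction l using pvPopTrailingA.induct with
  | case1 l h ih =>
    rw [pvPopTrailingA, dif_pos h, ih, pvTrim_step l h]
  | case2 l h =>
    rw [pvPopTrailingA, dif_neg h, pvTrim_stop l h]

-- ===== VERDICT (by name: the statement is the Claim_ definition above) =====
theorem split_solution_and_tests_spec : Claim_equal_split_solution_and_tests := by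
  intro source_lines _hdom
  unfold Spec_split_solution_and_tests split_solution_and_tests split_solution_and_tests_alt
  rw [pvGoA_split]
  simp only [List.nil_append]
  rw [pvPop_eq_trim]
  rfl
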